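-- pv_equiv track=rewrite | github.com/JulienPaterna/Python | exos_bac/adventofcode1/result1.py | adding
-- ===== SOURCE A (Python) =====
-- def adding(fichier):
--     tab = fichier.split("\n")
--     num_tab = []
--     tot = 0
--     for elem in tab:
--         num_tab = []
--         for char in elem:
--             if char.isnumeric() == True:
--                 num_tab.append(char)
--         if len(num_tab) == 1:
--             tot += int(num_tab[0]+num_tab[0])
--         elif(len(num_tab) > 1):
--             tot += int(num_tab[0]+num_tab[len(num_tab) - 1])
--     return tot
-- ===== SOURCE B (Python) =====
-- def adding(fichier):
--     tot = 0
--     for line in fichier.split("\n"):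
--         first = next((c for c in line if c.isnumeric()), None)
--         if first is not None:
--             last = next((c for c in reversed(line) if c.isnumeric()), first)
--             tot += int(first + last)
--     return tot
-- ===== Notes on version B (the rewrite author's own statement) =====
-- stated objective: simpler
-- what changed: Instead of building a per-line list of all digit characters and branching on its length, B probes each line once forward for the first digit and once backward for the last digit and adds int(first+last), which covers the single-digit case automatically.
import Mathlib
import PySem

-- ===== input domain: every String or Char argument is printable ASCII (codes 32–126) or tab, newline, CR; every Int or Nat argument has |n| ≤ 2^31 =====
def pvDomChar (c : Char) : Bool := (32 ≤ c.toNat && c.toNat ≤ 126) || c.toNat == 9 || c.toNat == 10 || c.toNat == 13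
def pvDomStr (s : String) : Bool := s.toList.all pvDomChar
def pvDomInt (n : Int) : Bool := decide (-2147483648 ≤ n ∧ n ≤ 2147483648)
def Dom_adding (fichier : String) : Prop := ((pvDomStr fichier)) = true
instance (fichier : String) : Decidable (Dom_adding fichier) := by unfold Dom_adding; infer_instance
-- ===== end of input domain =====

-- B replaces A's per-line digit-list construction with two single probes (first digit
-- forward, last digit backward) per line; objective: simpler.
-- On the printable-ASCII domain char.isnumeric() coincides with char.isdigit(),
-- ported as PySem.Chars.isdigit; int(two digit chars) never raises there, so the
-- '.getD 0' totality default is unreachable on Dom.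

-- ===== PORT A =====
def adding (fichier : String) : Int :=
  let tab := (PySem.Str.split? fichier "\n").getD []
  tab.foldl (fun tot elem =>
    let num_tab : List Char :=
      elem.toList.foldl (fun acc c => if PySem.Chars.isdigit c then acc ++ [c] else acc) []
    if num_tab.length = 1 then
      match PySem.List.pyGet? num_tab (0 : Int) with
      | some d => tot + (PySem.Int.ofChars? [d, d]).getD 0
      | none => tot   -- unreachable (length = 1)
    else if num_tab.length > 1 then
      match PySem.List.pyGet? num_tab (0 : Int),
            PySem.List.pyGet? num_tab ((num_tab.length : Int) - 1) with
      | some d, some e => tot + (PySem.Int.ofChars? [d, e]).getD 0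
      | _, _ => tot   -- unreachable (length > 1)
    else tot) 0

-- ===== PORT B =====
def adding_alt (fichier : String) : Int :=
  ((PySem.Str.split? fichier "\n").getD []).foldl (fun tot line =>
    match line.toList.find? PySem.Chars.isdigit with
    | none => tot
    | some first =>
      let last := (line.toList.reverse.find? PySem.Chars.isdigit).getD first
      tot + (PySem.Int.ofChars? [first, last]).getD 0) 0

-- ===== PRECONDITION & SPEC =====
def Spec_adding (fichier : String) (out : Int) : Prop := out = adding_alt fichier
instance (fichier : String) (out : Int) : Decidable (Spec_adding fichier out) := by unfold Spec_adding; infer_instance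

-- ===== CLAIM (what is proved, stated in full; the proofs are below) =====
def Claim_equal_adding : Prop := ∀ (fichier : String), Dom_adding fichier → Spec_adding fichier (adding fichier)

-- ===== LEMMAS AND PROOFS =====

-- find? returns the head of the filtered list
theorem find?_eq_head?_filter (p : Char → Bool) (l : List Char) :
    l.find? p = (l.filter p).head? := by
  induction l with
  | nil => rfl
  | cons c t ih =>
    cases h : p c with
    | true =>
      rw [List.find?_cons_of_pos h, List.filter_cons_of_pos h]
      rfl
    | false =>
      rw [List.find?_cons_of_neg (by simp [h]), List.filter_cons_of_neg (by simp [h]), ih]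

-- the per-line step functions of the two folds agree on every line
theorem step_eq (tot : Int) (elem : String) :
    (let num_tab : List Char :=
      elem.toList.foldl (fun acc c => if PySem.Chars.isdigit c then acc ++ [c] else acc) []
     if num_tab.length = 1 then
      match PySem.List.pyGet? num_tab (0 : Int) with
      | some d => tot + (PySem.Int.ofChars? [d, d]).getD 0
      | none => tot
     else if num_tab.length > 1 then
      match PySem.List.pyGet? num_tab (0 : Int),
            PySem.List.pyGet? num_tab ((num_tab.length : Int) - 1) with
      | some d, some e => tot + (PySem.Int.ofChars? [d, e]).getD 0
      | _, _ => tot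
     else tot) =
    (match elem.toList.find? PySem.Chars.isdigit with
     | none => tot
     | some first =>
       let last := (elem.toList.reverse.find? PySem.Chars.isdigit).getD first
       tot + (PySem.Int.ofChars? [first, last]).getD 0) := by
  rw [PySem.List.foldl_append_if_eq_filter]
  rw [find?_eq_head?_filter, find?_eq_head?_filter, List.filter_reverse,
    List.head?_reverse]
  simp only [List.nil_append]
  cases hds : elem.toList.filter PySem.Chars.isdigit with
  | nil => simp
  | cons d t =>
    cases t with
    | nil => simp [PySem.List.pyGet?, PySem.List.pyIdx?]
    | cons e u =>
      simp only [List.length_cons, List.head?_cons]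
      have hlen : ¬ (u.length + 1 + 1 = 1) := by omega
      have hgt : u.length + 1 + 1 > 1 := by omega
      simp only [hlen, if_false, hgt, if_true]
      have h0 : PySem.List.pyGet? (d :: e :: u) (0 : Int) = some d := by
        simp [PySem.List.pyGet?, PySem.List.pyIdx?,
          show (0:Int) ≤ (u.length:Int) + 1 by positivity]
      have h2 : PySem.List.pyGet? (d :: e :: u) (((u.length + 1 + 1 : Nat) : Int) - 1)
          = (d :: e :: u).getLast? := by
        have hc : ((u.length + 1 + 1 : Nat) : Int) - 1 = ((u.length + 1 : Nat) : Int) := by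
          push_cast; ring
        rw [hc, PySem.List.pyGet?_natCast, List.getLast?_eq_getElem?]
        simp
      rw [h0, h2]
      cases hlast : (d :: e :: u).getLast? with
      | none => simp at hlast
      | some x => simp

-- ===== VERDICT (by name: the statement is the Claim_ definition above) =====
theorem adding_spec : Claim_equal_adding := by
  intro fichier _
  show adding fichier = adding_alt fichier
  unfold adding adding_alt
  exact congrFun (congrFun (congrArg List.foldl
    (funext fun tot => funext fun elem => step_eq tot elem)) 0) _
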